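-- pv_equiv track=rewrite | github.com/dbaltaza/a-maze-ing | app/renderer_curses.py | _path_directions
-- ===== SOURCE A (Python) =====
-- def _path_directions(sequence: list[tuple[int, int]]) -> dict[tuple[int, int], set[str]]:
--     direction_map: dict[tuple[int, int], set[str]] = {}
--     move_lookup = {
--         (0, -1): "N",
--         (1, 0): "E",
--         (0, 1): "S",
--         (-1, 0): "W",
--     }
--     opposite = {"N": "S", "E": "W", "S": "N", "W": "E"}
--     for current, nxt in zip(sequence, sequence[1:]):
--         delta = (nxt[0] - current[0], nxt[1] - current[1])
--         direction = move_lookup[delta]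
--         direction_map.setdefault(current, set()).add(direction)
--         direction_map.setdefault(nxt, set()).add(opposite[direction])
--     return direction_map
-- ===== SOURCE B (Python) =====
-- def _path_directions(sequence: list[tuple[int, int]]) -> dict[tuple[int, int], set[str]]:
--     # Cell-centric: each cell reads its own direction toward each existing neighbor
--     # straight from the delta; no 'opposite' table, no edge pairing.
--     move_lookup = {
--         (0, -1): "N",
--         (1, 0): "E",
--         (0, 1): "S",
--         (-1, 0): "W",
--     }
--     direction_map: dict[tuple[int, int], set[str]] = {}
--     prevs = [None] + sequence[:-1]
--     nxts = sequence[1:] + [None]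
--     for prev, cell, nxt in zip(prevs, sequence, nxts):
--         for nb in (prev, nxt):
--             if nb is not None:
--                 delta = (nb[0] - cell[0], nb[1] - cell[1])
--                 direction_map.setdefault(cell, set()).add(move_lookup[delta])
--     return direction_map
-- ===== Notes on version B (the rewrite author's own statement) =====
-- stated objective: alternative
-- what changed: A's edge-centric loop over consecutive pairs (adding a direction to the first endpoint and its table-looked-up opposite to the second) is replaced by a cell-centric pass over a sentinel-padded zip of (prev, cell, next), where each cell computes its direction toward each existing neighbor directly from the neighbor delta, eliminating the 'opposite' table.
-- outside the precondition, e.g. on _path_directions([(0, 0), (2, 0)]): A raises KeyError, B raises KeyError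
import Mathlib
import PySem

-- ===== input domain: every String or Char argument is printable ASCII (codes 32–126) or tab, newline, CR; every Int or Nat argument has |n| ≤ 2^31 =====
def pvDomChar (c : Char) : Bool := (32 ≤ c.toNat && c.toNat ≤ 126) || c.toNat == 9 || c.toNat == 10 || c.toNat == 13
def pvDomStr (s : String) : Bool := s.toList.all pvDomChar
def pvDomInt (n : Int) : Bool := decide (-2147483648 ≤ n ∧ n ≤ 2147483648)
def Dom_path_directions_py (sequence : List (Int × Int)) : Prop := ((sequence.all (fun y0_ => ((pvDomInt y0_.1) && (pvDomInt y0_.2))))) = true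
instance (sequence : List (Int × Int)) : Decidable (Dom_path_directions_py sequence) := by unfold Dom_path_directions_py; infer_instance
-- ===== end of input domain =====

-- B replaces A's edge-centric pair loop (with an 'opposite' table) by a cell-centric
-- sentinel-padded zip over (prev, cell, next), each cell computing its directions
-- directly from the neighbor deltas; alternative decomposition, same cost.

-- shared lookup tables (Python dict literals move_lookup / opposite; "" marks the
-- KeyError case, which Pre_ excludes)
def pvMove (d : Int × Int) : String :=
  if d = ((0 : Int), (-1 : Int)) then "N"
  else if d = ((1 : Int), (0 : Int)) then "E"
  else if d = ((0 : Int), (1 : Int)) then "S"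
  else if d = ((-1 : Int), (0 : Int)) then "W"
  else ""

def pvOpp (dir : String) : String :=
  if dir = "N" then "S"
  else if dir = "E" then "W"
  else if dir = "S" then "N"
  else if dir = "W" then "E"
  else ""

-- direction_map.setdefault(k, set()).add(dir)  (mutating the looked-up set = Dict.modify)
def pvAddDir (d : PySem.Dict (Int × Int) (PySem.Set String)) (k : Int × Int)
    (dir : String) : PySem.Dict (Int × Int) (PySem.Set String) :=
  PySem.Dict.modify d k PySem.Set.empty (fun st => PySem.Set.add st dir)

-- ===== PORT A =====
def path_directions_py (sequence : List (Int × Int)) : List (Int × Int × List String) :=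
  let dm := (sequence.zip (PySem.List.slice sequence (some 1) none)).foldl
    (fun d cn =>
      let delta : Int × Int := (cn.2.1 - cn.1.1, cn.2.2 - cn.1.2)
      let direction := pvMove delta
      pvAddDir (pvAddDir d cn.1 direction) cn.2 (pvOpp direction))
    PySem.Dict.empty
  dm.items.map (fun kv => (kv.1.1, kv.1.2, kv.2))

-- ===== PORT B =====
def path_directions_py_alt (sequence : List (Int × Int)) : List (Int × Int × List String) :=
  let prevs : List (Option (Int × Int)) :=
    none :: (PySem.List.slice sequence none (some (-1))).map some
  let nxts : List (Option (Int × Int)) :=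
    (PySem.List.slice sequence (some 1) none).map some ++ [none]
  let dm := (prevs.zip (sequence.zip nxts)).foldl
    (fun d t =>
      [t.1, t.2.2].foldl
        (fun d nb =>
          match nb with
          | none => d
          | some p => pvAddDir d t.2.1 (pvMove (p.1 - t.2.1.1, p.2 - t.2.1.2)))
        d)
    PySem.Dict.empty
  dm.items.map (fun kv => (kv.1.1, kv.1.2, kv.2))

-- ===== PRECONDITION & SPEC =====
-- Pre_ excludes exactly the inputs where Python A raises KeyError: some pair of
-- consecutive cells whose delta is not a unit orthogonal move.
def Pre_path_directions_py (sequence : List (Int × Int)) : Prop :=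
  ∀ pq ∈ sequence.zip (sequence.drop 1),
    (pq.2.1 - pq.1.1, pq.2.2 - pq.1.2) ∈
      ([((0 : Int), (-1 : Int)), (1, 0), (0, 1), (-1, 0)] : List (Int × Int))
instance (sequence : List (Int × Int)) : Decidable (Pre_path_directions_py sequence) := by
  unfold Pre_path_directions_py; infer_instance

def pvWitness_path_directions_py : (List (Int × Int)) := [(0, 0), (1, 0), (1, 1)]

def Spec_path_directions_py (sequence : List (Int × Int)) (out : List (Int × Int × List String)) : Prop :=
  out = path_directions_py_alt sequence
instance (sequence : List (Int × Int)) (out : List (Int × Int × List String)) :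
    Decidable (Spec_path_directions_py sequence out) := by
  unfold Spec_path_directions_py; infer_instance

-- ===== CLAIM (what is proved, stated in full; the proofs are below) =====
def Claim_equal_path_directions_py : Prop := ∀ (sequence : List (Int × Int)), Dom_path_directions_py sequence → Pre_path_directions_py sequence → Spec_path_directions_py sequence (path_directions_py sequence)

-- ===== LEMMAS AND PROOFS =====

-- A's fold step (one edge: add dir to current, opposite to next)
def pvStepA (d : PySem.Dict (Int × Int) (PySem.Set String))
    (cn : (Int × Int) × (Int × Int)) : PySem.Dict (Int × Int) (PySem.Set String) :=
  let delta : Int × Int := (cn.2.1 - cn.1.1, cn.2.2 - cn.1.2)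
  let direction := pvMove delta
  pvAddDir (pvAddDir d cn.1 direction) cn.2 (pvOpp direction)

-- B's fold step (one cell with its optional neighbors)
def pvStepB (d : PySem.Dict (Int × Int) (PySem.Set String))
    (t : Option (Int × Int) × (Int × Int) × Option (Int × Int)) :
    PySem.Dict (Int × Int) (PySem.Set String) :=
  [t.1, t.2.2].foldl
    (fun d nb =>
      match nb with
      | none => d
      | some p => pvAddDir d t.2.1 (pvMove (p.1 - t.2.1.1, p.2 - t.2.1.2)))
    d

-- B's zipped triples, recursively
def pvT (pr : Option (Int × Int)) (l : List (Int × Int)) :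
    List (Option (Int × Int) × (Int × Int) × Option (Int × Int)) :=
  match l with
  | [] => []
  | c :: rest => (pr, c, rest.head?) :: pvT (some c) rest

-- the succ-contribution of a cell p whose successor list is l
def pvAux (d : PySem.Dict (Int × Int) (PySem.Set String)) (p : Int × Int)
    (l : List (Int × Int)) : PySem.Dict (Int × Int) (PySem.Set String) :=
  match l with
  | [] => d
  | c :: _ => pvAddDir d p (pvMove (c.1 - p.1, c.2 - p.2))

theorem pvMove_eq_empty {a b : Int} (h1 : ¬(a = 0 ∧ b = -1)) (h2 : ¬(a = 1 ∧ b = 0))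
    (h3 : ¬(a = 0 ∧ b = 1)) (h4 : ¬(a = -1 ∧ b = 0)) : pvMove (a, b) = "" := by
  simp only [pvMove, Prod.mk.injEq]
  split_ifs
  rfl

theorem pvOpp_move (a b : Int) : pvOpp (pvMove (a, b)) = pvMove (-a, -b) := by
  by_cases h1 : a = 0 ∧ b = -1
  · obtain ⟨rfl, rfl⟩ := h1; decide
  by_cases h2 : a = 1 ∧ b = 0
  · obtain ⟨rfl, rfl⟩ := h2; decide
  by_cases h3 : a = 0 ∧ b = 1
  · obtain ⟨rfl, rfl⟩ := h3; decide
  by_cases h4 : a = -1 ∧ b = 0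
  · obtain ⟨rfl, rfl⟩ := h4; decide
  · rw [pvMove_eq_empty h1 h2 h3 h4,
      pvMove_eq_empty (a := -a) (b := -b) (by omega) (by omega) (by omega) (by omega)]
    decide

theorem pvZip_eq_T (l : List (Int × Int)) (pr : Option (Int × Int)) :
    (pr :: l.dropLast.map some).zip (l.zip (l.tail.map some ++ [none])) = pvT pr l := by
  induction l generalizing pr with
  | nil => rfl
  | cons c rest ih =>
    cases rest with
    | nil => rfl
    | cons r rs =>
      simp only [pvT, List.dropLast_cons₂, List.map_cons, List.tail_cons, List.zip_cons_cons,
        List.head?_cons, List.cons_append]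
      exact congrArg (List.cons _) (ih (some c))

theorem pvMain (l : List (Int × Int)) (p : Int × Int)
    (d : PySem.Dict (Int × Int) (PySem.Set String)) :
    ((p :: l).zip l).foldl pvStepA d = (pvT (some p) l).foldl pvStepB (pvAux d p l) := by
  induction l generalizing p d with
  | nil => rfl
  | cons c rest ih =>
    simp only [List.zip_cons_cons, List.foldl_cons, pvT]
    rw [ih c (pvStepA d (p, c))]
    congr 1
    have hstep : pvAux (pvStepA d (p, c)) c rest
        = pvStepB (pvAddDir d p (pvMove (c.1 - p.1, c.2 - p.2))) (some p, c, rest.head?) := by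
      have hopp : pvOpp (pvMove (c.1 - p.1, c.2 - p.2)) = pvMove (p.1 - c.1, p.2 - c.2) := by
        have := pvOpp_move (c.1 - p.1) (c.2 - p.2)
        simpa [show -(c.1 - p.1) = p.1 - c.1 by ring, show -(c.2 - p.2) = p.2 - c.2 by ring]
          using this
      cases rest with
      | nil => simp [pvStepB, pvStepA, pvAux, hopp]
      | cons nx rs => simp [pvStepB, pvStepA, pvAux, hopp]
    exact hstep

theorem pvCore_eq (s : List (Int × Int)) :
    (s.zip s.tail).foldl pvStepA PySem.Dict.empty
      = ((none :: s.dropLast.map some).zip (s.zip (s.tail.map some ++ [none]))).foldl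
          pvStepB PySem.Dict.empty := by
  rw [pvZip_eq_T]
  cases s with
  | nil => rfl
  | cons p l =>
    simp only [List.tail_cons, pvT, List.foldl_cons]
    rw [pvMain l p PySem.Dict.empty]
    congr 1
    cases l with
    | nil => rfl
    | cons c rest => rfl

-- ===== VERDICT (by name: the statement is the Claim_ definition above) =====
theorem path_directions_py_spec : Claim_equal_path_directions_py := by
  intro s _ _
  unfold Spec_path_directions_py path_directions_py path_directions_py_alt
  rw [PySem.List.slice_from_one, PySem.List.slice_to_neg_one]
  exact congrArg (fun dm => dm.items.map (fun kv => (kv.1.1, kv.1.2, kv.2))) (pvCore_eq s)
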